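-- pv_equiv track=rewrite | github.com/OlenaSakhanda1/python_dq | homework_modul_4_1.py | generate_result_dict
-- ===== SOURCE A (Python) =====
-- from collections import Counter
--
-- def generate_result_dict(common_dict):
--     check = []
--     for key, value in common_dict.items():
--         check.append(key[0])
--
--     item_counts = Counter(check)
--     correct = []
--     for item, count in item_counts.items():
--         if count > 1:
--             correct.append(item)
--
--     max_value = -1
--     key_with_max_value = None
--     result_dict = {}
--     for i in range(len(correct)):
--         for key, value in common_dict.items():
--             if key.startswith(correct[i]):
--                 if value > max_value:
--                     max_value = value
--                     key_with_max_value = key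
--         result_dict[key_with_max_value] = max_value
--         max_value = -1
--         key_with_max_value = None
--     for key, value in common_dict.items():
--         if key[0] not in correct:
--             result_dict[key[0]] = value
--     return result_dict
-- ===== SOURCE B (Python) =====
-- def generate_result_dict(common_dict):
--     # Single pass: group entries by first character, then pick the best entry per group.
--     groups = {}
--     for key, value in common_dict.items():
--         groups.setdefault(key[0], []).append((key, value))
--     result_dict = {}
--     singles = []
--     for c, g in groups.items():
--         if len(g) > 1:
--             best_key, best_value = g[0]
--             for k, v in g[1:]:
--                 if v > best_value:
--                     best_key, best_value = k, v
--             result_dict[best_key] = best_value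
--         else:
--             singles.append((c, g[0][1]))
--     for c, v in singles:
--         result_dict[c] = v
--     return result_dict
-- ===== Notes on version B (the rewrite author's own statement) =====
-- stated objective: faster
-- what changed: A rescans the whole dict once per duplicated first character (plus a Counter pass and a membership-in-list pass); B builds a first-char -> entries dict in one pass and picks each group's best entry in one pass over the groups.
-- outside the precondition, e.g. on generate_result_dict({'aa': -5, 'ab': -3}): A returns {None: -1}, B returns {'ab': -3}
import Mathlib
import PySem

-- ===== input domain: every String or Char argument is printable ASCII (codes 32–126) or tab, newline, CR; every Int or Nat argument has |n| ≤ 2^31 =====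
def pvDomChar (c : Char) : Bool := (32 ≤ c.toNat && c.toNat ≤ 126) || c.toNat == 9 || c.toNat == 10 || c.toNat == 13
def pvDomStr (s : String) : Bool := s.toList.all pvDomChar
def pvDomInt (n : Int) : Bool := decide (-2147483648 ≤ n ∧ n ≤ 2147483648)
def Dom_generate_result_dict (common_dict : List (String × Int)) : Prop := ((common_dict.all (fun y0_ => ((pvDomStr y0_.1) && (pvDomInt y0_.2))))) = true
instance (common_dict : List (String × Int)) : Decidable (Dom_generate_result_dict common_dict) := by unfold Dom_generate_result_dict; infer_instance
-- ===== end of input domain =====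

-- B replaces A's repeated full scans per duplicated first character by one grouping pass
-- (dict first-char -> entries) and one best-entry pass per group; objective: faster.

-- ===== PORT A =====
-- key[0] as a Char; exact for nonempty keys (Pre_ excludes "" keys, where Python raises IndexError)
def pvHead (k : String) : Char := k.toList.headD ' '

def generate_result_dict (common_dict : List (String × Int)) : List (String × Int) :=
  let d := PySem.Dict.ofList common_dict
  -- check = [key[0] for key in common_dict]
  let check : List Char := d.items.foldl (fun acc p => acc ++ [pvHead p.1]) []
  let item_counts := PySem.Dict.counter check
  -- correct = first chars occurring more than once
  let correct : List Char := item_counts.items.foldl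
      (fun acc p => if p.2 > 1 then acc ++ [p.1] else acc) []
  -- for i in range(len(correct)): full scan of common_dict tracking (max_value, key_with_max_value)
  let step3 : PySem.Dict String Int :=
    (PySem.List.pyRange 0 (PySem.List.len correct) 1).foldl
      (fun st j =>
        let c := PySem.List.pyGetD correct j ' '
        let s := d.items.foldl
          (fun (s : Int × Option String) p =>
            -- key.startswith(correct[i]): 1-char pattern on a nonempty key = first-char equality
            if pvHead p.1 == c then
              (if p.2 > s.1 then (p.2, some p.1) else s)
            else s) (-1, none)
        st.insert (s.2.getD "") s.1) PySem.Dict.empty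
  -- for key, value: if key[0] not in correct: result_dict[key[0]] = value
  let result := d.items.foldl
      (fun (st : PySem.Dict String Int) p =>
        if pvHead p.1 ∉ correct then st.insert (String.ofList [pvHead p.1]) p.2 else st) step3
  result.items

-- ===== PORT B =====
def generate_result_dict_alt (common_dict : List (String × Int)) : List (String × Int) :=
  let items := (PySem.Dict.ofList common_dict).items
  -- one pass: groups[key[0]].append((key, value))
  let groups : PySem.Dict Char (List (String × Int)) :=
    items.foldl (fun g p => g.modify (pvHead p.1) [] (fun l => l ++ [p])) PySem.Dict.empty
  -- one pass over groups: best entry of each multi-entry group; singles collected aside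
  let st := groups.items.foldl
      (fun (st : PySem.Dict String Int × List (Char × Int)) cg =>
        match cg.2 with
        | [] => st
        | q :: rest =>
          if rest.isEmpty then (st.1, st.2 ++ [(cg.1, q.2)])
          else
            let best := rest.foldl (fun b p => if p.2 > b.2 then p else b) q
            (st.1.insert best.1 best.2, st.2))
      (PySem.Dict.empty, [])
  (st.2.foldl (fun (r : PySem.Dict String Int) s => r.insert (String.ofList [s.1]) s.2) st.1).items

-- ===== PRECONDITION & SPEC =====
-- Pre_ excludes (a) empty-string keys, on which A raises IndexError, and (b) inputs where some
-- duplicated-first-char group has only negative values: there A's '-1'-seeded scan returns the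
-- non-str key None (result {None: -1}), which is not a value of the declared dict[str, int] type.
def Pre_generate_result_dict (common_dict : List (String × Int)) : Prop :=
  (∀ p ∈ (PySem.Dict.ofList common_dict).items, p.1 ≠ "") ∧
  (∀ p ∈ (PySem.Dict.ofList common_dict).items,
     1 < ((PySem.Dict.ofList common_dict).items.filter
            (fun q => q.1.toList.headD ' ' == p.1.toList.headD ' ')).length →
     ∃ q ∈ (PySem.Dict.ofList common_dict).items,
       q.1.toList.headD ' ' = p.1.toList.headD ' ' ∧ 0 ≤ q.2)
instance (common_dict : List (String × Int)) : Decidable (Pre_generate_result_dict common_dict) := by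
  unfold Pre_generate_result_dict; infer_instance

def pvWitness_generate_result_dict : (List (String × Int)) :=
  [("apple", 3), ("apricot", -1), ("banana", 5), ("cherry", -2)]

def Spec_generate_result_dict (common_dict : List (String × Int)) (out : List (String × Int)) : Prop := out = generate_result_dict_alt common_dict
instance (common_dict : List (String × Int)) (out : List (String × Int)) : Decidable (Spec_generate_result_dict common_dict out) := by unfold Spec_generate_result_dict; infer_instance

-- ===== CLAIM (what is proved, stated in full; the proofs are below) =====
def Claim_equal_generate_result_dict : Prop := ∀ (common_dict : List (String × Int)), Dom_generate_result_dict common_dict → Pre_generate_result_dict common_dict → Spec_generate_result_dict common_dict (generate_result_dict common_dict)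

-- ===== LEMMAS AND PROOFS =====

-- best entry of a group, seeded with its first element (B's inner loop)
def pvBest (q : String × Int) (rest : List (String × Int)) : String × Int :=
  rest.foldl (fun b p => if p.2 > b.2 then p else b) q

def pvBest1 (M : List (String × Int)) : String × Int :=
  match M with
  | [] => ("", -1)
  | q :: rest => pvBest q rest

-- A's inner-scan step on an already-filtered group
def pvStepA (s : Int × Option String) (p : String × Int) : Int × Option String :=
  if p.2 > s.1 then (p.2, some p.1) else s

def pvL (cd : List (String × Int)) : List (String × Int) := (PySem.Dict.ofList cd).items
def pvCk (cd : List (String × Int)) : List Char := (pvL cd).map (fun p => pvHead p.1)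
def pvM (cd : List (String × Int)) (c : Char) : List (String × Int) :=
  (pvL cd).filter (fun p => pvHead p.1 == c)
def pvCorrect (cd : List (String × Int)) : List Char :=
  (PySem.Set.ofList (pvCk cd)).filter (fun c => decide ((1:Int) < ((pvCk cd).count c : Int)))

theorem pvCount_head (cd : List (String × Int)) (c : Char) :
    (pvCk cd).count c = (pvM cd c).length := by
  rw [pvCk, List.count_eq_length_filter, List.filter_map, List.length_map]
  rfl


theorem pvBest_mem (q : String × Int) (rest : List (String × Int)) :
    pvBest q rest ∈ q :: rest := by
  induction rest generalizing q with
  | nil => simp [pvBest]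
  | cons p rest ih =>
    simp only [pvBest, List.foldl_cons]
    have h := ih (if p.2 > q.2 then p else q)
    simp only [pvBest] at h
    rcases List.mem_cons.mp h with h1 | h1
    · rw [h1]
      by_cases hc : p.2 > q.2
      · simp [hc]
      · simp [hc]
    · exact List.mem_cons_of_mem _ (List.mem_cons_of_mem _ h1)

theorem pvBest_seed_irrel (M : List (String × Int)) (b b' : String × Int)
    (hb : b.2 < 0) (hb' : b'.2 < 0) (hex : ∃ q ∈ M, 0 ≤ q.2) :
    pvBest b M = pvBest b' M := by
  induction M generalizing b b' with
  | nil => rcases hex with ⟨q, hq, _⟩; simp at hq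
  | cons x M ih =>
    simp only [pvBest, List.foldl_cons]
    by_cases hx : 0 ≤ x.2
    · have h1 : x.2 > b.2 := lt_of_lt_of_le hb hx
      have h2 : x.2 > b'.2 := lt_of_lt_of_le hb' hx
      simp [h1, h2]
    · push_neg at hx
      have hex' : ∃ q ∈ M, 0 ≤ q.2 := by
        rcases hex with ⟨q, hq, hq0⟩
        rcases List.mem_cons.mp hq with h1 | h1
        · exfalso; rw [h1] at hq0; omega
        · exact ⟨q, h1, hq0⟩
      have e1 : ((if x.2 > b.2 then x else b) : String × Int).2 < 0 := by
        by_cases h1 : x.2 > b.2 <;> simp [h1] <;> omega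
      have e2 : ((if x.2 > b'.2 then x else b') : String × Int).2 < 0 := by
        by_cases h1 : x.2 > b'.2 <;> simp [h1] <;> omega
      have := ih _ _ e1 e2 hex'
      simpa [pvBest] using this

theorem pvFoldA_of_nonneg_seed (M : List (String × Int)) (b : String × Int) (hb : 0 ≤ b.2) :
    M.foldl pvStepA (b.2, some b.1) = ((pvBest b M).2, some (pvBest b M).1) := by
  induction M generalizing b with
  | nil => simp [pvBest]
  | cons p M ih =>
    simp only [List.foldl_cons, pvStepA, pvBest]
    by_cases hc : p.2 > b.2
    · simpa [hc, pvBest] using ih p (by omega)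
    · simpa [hc, pvBest] using ih b hb

theorem pvFoldA_eq_best1 (M : List (String × Int)) (hex : ∃ q ∈ M, 0 ≤ q.2) :
    M.foldl pvStepA (-1, none) = ((pvBest1 M).2, some (pvBest1 M).1) := by
  induction M with
  | nil => rcases hex with ⟨q, hq, _⟩; simp at hq
  | cons p M ih =>
    simp only [List.foldl_cons, pvBest1]
    by_cases hp : 0 ≤ p.2
    · have h0 : pvStepA (-1, none) p = (p.2, some p.1) := by
        simp only [pvStepA]; rw [if_pos (by omega)]
      rw [h0, pvFoldA_of_nonneg_seed M p hp]
    · push_neg at hp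
      have h1 : pvStepA (-1, none) p = (-1, none) := by
        simp only [pvStepA]; rw [if_neg (by omega)]
      rw [h1]
      rcases hex with ⟨q, hq, hq0⟩
      have hqM : q ∈ M := by
        rcases List.mem_cons.mp hq with h2 | h2
        · exfalso; rw [h2] at hq0; omega
        · exact h2
      rw [ih ⟨q, hqM, hq0⟩]
      cases M with
      | nil => simp at hqM
      | cons r rs =>
        simp only [pvBest1, pvBest, List.foldl_cons]
        by_cases hr : 0 ≤ r.2
        · have h3 : r.2 > p.2 := lt_of_lt_of_le hp hr
          simp [h3]
        · push_neg at hr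
          have hqrs : q ∈ rs := by
            rcases List.mem_cons.mp hqM with h2 | h2
            · exfalso; rw [h2] at hq0; omega
            · exact h2
          have h4 := pvBest_seed_irrel rs (if r.2 > p.2 then r else p) r
            (by by_cases h2 : r.2 > p.2 <;> simp [h2] <;> omega) hr ⟨q, hqrs, hq0⟩
          simp only [pvBest] at h4 ⊢
          rw [h4]

theorem pvOfList_filter (xs : List Char) (q : Char → Bool)
    (hq : ∀ b, q b = true → xs.count b ≤ 1) :
    (PySem.Set.ofList xs).filter q = xs.filter q := by
  induction xs with
  | nil => simp [PySem.Set.ofList_nil]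
  | cons x xs ih =>
    rw [PySem.Set.ofList_cons]
    by_cases hx : q x = true
    · have hcnt : (x :: xs).count x ≤ 1 := hq x hx
      have hxnot : x ∉ xs := by
        intro hmem
        have h1 : List.count x (x :: xs) = List.count x xs + 1 := List.count_cons_self
        have h2 := List.count_pos_iff.mpr hmem
        omega
      have hdisc : (PySem.Set.ofList xs).discard x = PySem.Set.ofList xs := by
        simp only [PySem.Set.discard]
        apply List.filter_eq_self.mpr
        intro a ha
        have : a ∈ xs := (PySem.Set.mem_ofList xs a).mp ha
        simp only [bne_iff_ne, ne_eq, Bool.not_eq_eq_eq_not, Bool.not_true, beq_eq_false_iff_ne]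
        intro hax; rw [hax] at this; exact hxnot this
      rw [List.filter_cons_of_pos hx, hdisc, List.filter_cons_of_pos hx]
      congr 1
      apply ih
      intro b hb
      have := hq b hb
      have h2 : List.count b xs ≤ List.count b (x :: xs) := by
        rw [List.count_cons]; omega
      omega
    · rw [List.filter_cons_of_neg hx, List.filter_cons_of_neg hx]
      have : ((PySem.Set.ofList xs).discard x).filter q = (PySem.Set.ofList xs).filter q := by
        simp only [PySem.Set.discard, List.filter_filter]
        apply List.filter_congr
        intro a ha
        by_cases hax : a = x
        · subst hax; simp [hx]
        · simp [hax]
      rw [this]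
      apply ih
      intro b hb
      have := hq b hb
      have h2 : List.count b xs ≤ List.count b (x :: xs) := by
        rw [List.count_cons]; omega
      omega


theorem pvSplit (its : List (Char × List (String × Int))) (d : PySem.Dict String Int)
    (s : List (Char × Int)) (h : ∀ x ∈ its, x.2 ≠ []) :
    its.foldl
      (fun (st : PySem.Dict String Int × List (Char × Int)) cg =>
        match cg.2 with
        | [] => st
        | q :: rest =>
          if rest.isEmpty then (st.1, st.2 ++ [(cg.1, q.2)])
          else
            let best := rest.foldl (fun b p => if p.2 > b.2 then p else b) q
            (st.1.insert best.1 best.2, st.2)) (d, s)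
    = ((its.filter (fun x => decide (1 < x.2.length))).foldl
         (fun d x => d.insert (pvBest1 x.2).1 (pvBest1 x.2).2) d,
       s ++ (its.filter (fun x => decide (x.2.length = 1))).map (fun x => (x.1, (pvBest1 x.2).2))) := by
  induction its generalizing d s with
  | nil => simp
  | cons x its ih =>
    obtain ⟨q, rest, hx⟩ : ∃ q rest, x.2 = q :: rest := by
      cases hxe : x.2 with
      | nil => exact absurd hxe (h x (List.mem_cons_self))
      | cons a b => exact ⟨a, b, rfl⟩
    have hrest : ∀ y ∈ its, y.2 ≠ [] := fun y hy => h y (List.mem_cons_of_mem _ hy)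
    cases rest with
    | nil =>
      have h1 : (1 < x.2.length) = False := by simp [hx]
      have h2 : (x.2.length = 1) = True := by simp [hx]
      simp only [List.foldl_cons, hx, List.isEmpty_nil, if_true, List.filter_cons, h1, h2,
        decide_true, decide_false, ih _ _ hrest]
      simp [hx, pvBest1, pvBest]
    | cons r rs =>
      have h1 : (1 < x.2.length) = True := by simp [hx]
      have h2 : (x.2.length = 1) = False := by simp [hx]
      simp only [List.foldl_cons, hx, List.isEmpty_cons, if_false, List.filter_cons, h1, h2,
        decide_true, decide_false, ih _ _ hrest]
      simp [hx, pvBest1, pvBest]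

theorem pvGroups_items (cd : List (String × Int)) :
    ((pvL cd).foldl (fun g p => g.modify (pvHead p.1) [] (fun l => l ++ [p]))
      (PySem.Dict.empty : PySem.Dict Char (List (String × Int)))).items
    = (PySem.Set.ofList (pvCk cd)).map (fun c => (c, pvM cd c)) := by
  set G := (pvL cd).foldl (fun g p => g.modify (pvHead p.1) [] (fun l => l ++ [p]))
      (PySem.Dict.empty : PySem.Dict Char (List (String × Int))) with hG
  have hkeys : G.keys = PySem.Set.ofList (pvCk cd) := by
    rw [hG, PySem.Dict.keys_foldl_modify_key (pvL cd) (fun p => pvHead p.1) []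
      (fun _ x => fun l => l ++ [x]) PySem.Dict.empty]
    rw [PySem.Dict.keys_empty, PySem.Set.update_nil_left]
    rfl
  have hnd : G.keys.Nodup := by rw [hkeys]; exact PySem.Set.nodup_ofList _
  have hget : ∀ c, G.getD c [] = pvM cd c := by
    intro c
    rw [hG, ← List.foldl_map (f := fun p : String × Int => (pvHead p.1, p))
      (g := fun (g : PySem.Dict Char (List (String × Int))) q => g.modify q.1 [] (fun l => l ++ [q.2]))]
    rw [PySem.Dict.getD_foldl_modify_append]
    simp only [PySem.Dict.getD_empty, List.nil_append, List.filter_map]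
    rw [List.map_map, pvM]
    have : ((fun (x : Char × (String × Int)) => x.2) ∘ fun p : String × Int => (pvHead p.1, p)) = id := rfl
    rw [this, List.map_id]
    rfl
  rw [PySem.Dict.items_eq_map_keys G hnd [], hkeys]
  exact List.map_congr_left (fun c _ => by rw [hget c])
theorem pvBest1_mem (M : List (String × Int)) (h : M ≠ []) : pvBest1 M ∈ M := by
  cases M with
  | nil => exact absurd rfl h
  | cons q rest => simpa [pvBest1] using pvBest_mem q rest

theorem pvM_head (cd : List (String × Int)) (c : Char) (p : String × Int)
    (hp : p ∈ pvM cd c) : pvHead p.1 = c := by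
  have := (List.mem_filter.mp hp).2
  simpa using this

theorem pvM_ne_nil (cd : List (String × Int)) (c : Char)
    (hc : c ∈ PySem.Set.ofList (pvCk cd)) : pvM cd c ≠ [] := by
  have hck : c ∈ pvCk cd := (PySem.Set.mem_ofList _ _).mp hc
  obtain ⟨p, hp, hpc⟩ := List.mem_map.mp hck
  intro hnil
  have : p ∈ pvM cd c := List.mem_filter.mpr ⟨hp, by simp [hpc]⟩
  rw [hnil] at this; simp at this

theorem pvHead_best (cd : List (String × Int)) (c : Char)
    (hc : c ∈ PySem.Set.ofList (pvCk cd)) : pvHead (pvBest1 (pvM cd c)).1 = c :=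
  pvM_head cd c _ (pvBest1_mem _ (pvM_ne_nil cd c hc))

theorem portB_eq (cd : List (String × Int)) :
    generate_result_dict_alt cd
    = ((PySem.Set.ofList (pvCk cd)).filter (fun c => decide (1 < (pvM cd c).length))).map
        (fun c => ((pvBest1 (pvM cd c)).1, (pvBest1 (pvM cd c)).2))
      ++ ((PySem.Set.ofList (pvCk cd)).filter (fun c => decide ((pvM cd c).length = 1))).map
        (fun c => (String.ofList [c], (pvBest1 (pvM cd c)).2)) := by
  have hS := PySem.Set.nodup_ofList (pvCk cd)
  simp only [generate_result_dict_alt]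
  have hL : (PySem.Dict.ofList cd).items = pvL cd := rfl
  rw [hL, pvGroups_items cd]
  rw [pvSplit _ _ _ (by
    intro x hx
    obtain ⟨c, hc, hcx⟩ := List.mem_map.mp hx
    rw [← hcx]
    exact pvM_ne_nil cd c hc)]
  -- filters over the map
  rw [List.filter_map, List.filter_map]
  simp only [Function.comp_def]
  rw [List.foldl_map, List.map_map]
  simp only [Function.comp_def]
  -- the dict of best entries of multi groups
  set multis := (PySem.Set.ofList (pvCk cd)).filter (fun c => decide (1 < (pvM cd c).length)) with hmultis
  set singles := (PySem.Set.ofList (pvCk cd)).filter (fun c => decide ((pvM cd c).length = 1)) with hsingles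
  have hD1 : (multis.foldl (fun (x : PySem.Dict String Int) y =>
      x.insert (pvBest1 (pvM cd y)).1 (pvBest1 (pvM cd y)).2) PySem.Dict.empty).items
      = multis.map (fun c => ((pvBest1 (pvM cd c)).1, (pvBest1 (pvM cd c)).2)) := by
    rw [PySem.Dict.items_foldl_insert_fresh multis (fun c => (pvBest1 (pvM cd c)).1)
      (fun c => (pvBest1 (pvM cd c)).2) _
      (fun c _ => PySem.Dict.contains_empty _)
      (by
        apply List.Nodup.map_on
        · intro x hx y hy hxy
          have hx' : x ∈ PySem.Set.ofList (pvCk cd) := List.mem_of_mem_filter hx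
          have hy' : y ∈ PySem.Set.ofList (pvCk cd) := List.mem_of_mem_filter hy
          rw [← pvHead_best cd x hx', ← pvHead_best cd y hy', hxy]
        · exact hS.filter _)]
    rfl
  rw [List.nil_append, List.foldl_map]
  rw [PySem.Dict.items_foldl_insert_fresh singles (fun c => String.ofList [c])
      (fun c => (pvBest1 (pvM cd c)).2) _
      (by
        intro c hc
        rw [PySem.Dict.contains_eq_decide_mem_keys]
        have hkeys : (multis.foldl (fun (x : PySem.Dict String Int) y =>
            x.insert (pvBest1 (pvM cd y)).1 (pvBest1 (pvM cd y)).2) PySem.Dict.empty).keys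
            = multis.map (fun c => (pvBest1 (pvM cd c)).1) := by
          show ((List.foldl (fun (x : PySem.Dict String Int) y =>
              x.insert (pvBest1 (pvM cd y)).1 (pvBest1 (pvM cd y)).2) PySem.Dict.empty multis).items.map (·.1)) = _
          rw [hD1, List.map_map]; rfl
        rw [hkeys]
        simp only [decide_eq_false_iff_not]
        intro hmem
        obtain ⟨c', hc', hcc⟩ := List.mem_map.mp hmem
        have hc'S : c' ∈ PySem.Set.ofList (pvCk cd) := List.mem_of_mem_filter hc'
        have : c = c' := by
          have h1 : pvHead (String.ofList [c]) = c := by simp [pvHead, String.toList_ofList]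
          rw [← h1, ← hcc, pvHead_best cd c' hc'S]
        subst this
        have hm := (List.mem_filter.mp hc').2
        have hs := (List.mem_filter.mp hc).2
        simp only [decide_eq_true_eq] at hm hs
        omega)
      (by
        apply List.Nodup.map_on
        · intro x _ y _ hxy
          have := congrArg String.toList hxy
          simpa [String.toList_ofList] using this
        · exact hS.filter _)]
  rw [hD1]

theorem pvScanA (cd : List (String × Int)) (c : Char) (hex : ∃ q ∈ pvM cd c, 0 ≤ q.2) :
    (pvL cd).foldl
      (fun (s : Int × Option String) p =>
        if pvHead p.1 == c then (if p.2 > s.1 then (p.2, some p.1) else s) else s) (-1, none)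
    = ((pvBest1 (pvM cd c)).2, some (pvBest1 (pvM cd c)).1) := by
  have h := List.foldl_filter (p := fun p : String × Int => pvHead p.1 == c)
    (f := pvStepA) (l := pvL cd) (init := ((-1 : Int), (none : Option String)))
  show (pvL cd).foldl (fun s p => if pvHead p.1 == c then pvStepA s p else s) (-1, none) = _
  rw [← h]
  exact pvFoldA_eq_best1 _ hex
theorem pvL_nodup (cd : List (String × Int)) : (pvL cd).Nodup := by
  have h := PySem.Dict.nodup_keys_ofList cd
  exact h.of_map
theorem pvCk_mem (cd : List (String × Int)) (p : String × Int) (hp : p ∈ pvL cd) :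
    pvHead p.1 ∈ pvCk cd := List.mem_map.mpr ⟨p, hp, rfl⟩
theorem pvM_self (cd : List (String × Int)) (p : String × Int) (hp : p ∈ pvL cd) :
    p ∈ pvM cd (pvHead p.1) := List.mem_filter.mpr ⟨hp, by simp⟩

theorem portA_eq (cd : List (String × Int))
    (hex : ∀ c ∈ PySem.Set.ofList (pvCk cd), 1 < (pvM cd c).length → ∃ q ∈ pvM cd c, 0 ≤ q.2) :
    generate_result_dict cd
    = ((PySem.Set.ofList (pvCk cd)).filter (fun c => decide (1 < (pvM cd c).length))).map
        (fun c => ((pvBest1 (pvM cd c)).1, (pvBest1 (pvM cd c)).2))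
      ++ ((pvL cd).filter (fun p => decide (pvHead p.1 ∉
            (PySem.Set.ofList (pvCk cd)).filter (fun c => decide (1 < (pvM cd c).length))))).map
        (fun p => (String.ofList [pvHead p.1], p.2)) := by
  have hS := PySem.Set.nodup_ofList (pvCk cd)
  simp only [generate_result_dict]
  have hL : (PySem.Dict.ofList cd).items = pvL cd := rfl
  rw [hL]
  rw [PySem.List.foldl_append_singleton_eq_map (fun p : String × Int => pvHead p.1) (pvL cd) [],
      List.nil_append]
  have hck : (pvL cd).map (fun p : String × Int => pvHead p.1) = pvCk cd := rfl
  rw [hck, PySem.Dict.items_counter]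
  have hbool : (fun (acc : List Char) (p : Char × Int) => if p.2 > 1 then acc ++ [p.1] else acc)
      = (fun acc p => if (fun (p : Char × Int) => decide (p.2 > 1)) p = true then acc ++ [p.1] else acc) := by
    funext acc p
    by_cases h : p.2 > 1 <;> simp [h]
  rw [hbool, PySem.List.foldl_append_if, List.nil_append, List.filter_map, List.map_map]
  have hcorr : ((PySem.Set.ofList (pvCk cd)).filter
        ((fun (p : Char × Int) => decide (p.2 > 1)) ∘ fun k => (k, ((pvCk cd).count k : Int)))).map
        ((fun p : Char × Int => p.1) ∘ fun k => (k, ((pvCk cd).count k : Int)))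
      = (PySem.Set.ofList (pvCk cd)).filter (fun c => decide (1 < (pvM cd c).length)) := by
    have h1 : ((fun (p : Char × Int) => decide (p.2 > 1)) ∘ fun k : Char => (k, ((pvCk cd).count k : Int)))
        = (fun c => decide (1 < (pvM cd c).length)) := by
      funext c
      simp only [Function.comp_def]
      rw [← pvCount_head]
      simp [Nat.one_lt_cast]
    rw [h1]
    have h2 : ((fun p : Char × Int => p.1) ∘ fun k : Char => (k, ((pvCk cd).count k : Int)))
        = (fun c : Char => c) := rfl
    rw [h2, List.map_id']
  rw [hcorr]
  set C := (PySem.Set.ofList (pvCk cd)).filter (fun c => decide (1 < (pvM cd c).length)) with hC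
  -- range(len(correct)) loop -> fold over correct
  rw [PySem.List.foldl_pyRange_zero_pyGetD C ' '
      (fun (st : PySem.Dict String Int) c =>
        st.insert
          (((pvL cd).foldl
            (fun (s : Int × Option String) p =>
              if pvHead p.1 == c then (if p.2 > s.1 then (p.2, some p.1) else s) else s)
            (-1, none)).2.getD "")
          (((pvL cd).foldl
            (fun (s : Int × Option String) p =>
              if pvHead p.1 == c then (if p.2 > s.1 then (p.2, some p.1) else s) else s)
            (-1, none)).1)) PySem.Dict.empty]
  -- replace the inner scan by the best entry of the group
  rw [PySem.List.foldl_congr_mem C _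
      (fun (st : PySem.Dict String Int) c =>
        st.insert (pvBest1 (pvM cd c)).1 (pvBest1 (pvM cd c)).2) PySem.Dict.empty
      (by
        intro st c hc
        have hcS : c ∈ PySem.Set.ofList (pvCk cd) := List.mem_of_mem_filter hc
        have hlen := (List.mem_filter.mp hc).2
        simp only [decide_eq_true_eq] at hlen
        rw [pvScanA cd c (hex c hcS hlen)]; rfl)]
  have hD1 : ((C.foldl (fun (st : PySem.Dict String Int) c =>
      st.insert (pvBest1 (pvM cd c)).1 (pvBest1 (pvM cd c)).2) PySem.Dict.empty)).items
      = C.map (fun c => ((pvBest1 (pvM cd c)).1, (pvBest1 (pvM cd c)).2)) := by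
    rw [PySem.Dict.items_foldl_insert_fresh C (fun c => (pvBest1 (pvM cd c)).1)
      (fun c => (pvBest1 (pvM cd c)).2) _
      (fun c _ => PySem.Dict.contains_empty _)
      (by
        apply List.Nodup.map_on
        · intro x hx y hy hxy
          have hx' : x ∈ PySem.Set.ofList (pvCk cd) := List.mem_of_mem_filter hx
          have hy' : y ∈ PySem.Set.ofList (pvCk cd) := List.mem_of_mem_filter hy
          rw [← pvHead_best cd x hx', ← pvHead_best cd y hy', hxy]
        · exact hS.filter _)]
    rfl
  -- last loop: keys outside correct
  have hbool4 : (fun (st : PySem.Dict String Int) (p : String × Int) =>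
        if pvHead p.1 ∉ C then st.insert (String.ofList [pvHead p.1]) p.2 else st)
      = (fun st p => if (fun (p : String × Int) => decide (pvHead p.1 ∉ C)) p = true
          then st.insert (String.ofList [pvHead p.1]) p.2 else st) := by
    funext st p
    by_cases h : pvHead p.1 ∉ C <;> simp [h]
  rw [hbool4, ← List.foldl_filter]
  rw [PySem.Dict.items_foldl_insert_fresh
      ((pvL cd).filter (fun p => decide (pvHead p.1 ∉ C)))
      (fun p => String.ofList [pvHead p.1]) (fun p => p.2) _
      (by
        intro p hp
        have hpL : p ∈ pvL cd := List.mem_of_mem_filter hp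
        have hpc := (List.mem_filter.mp hp).2
        simp only [decide_eq_true_eq] at hpc
        rw [PySem.Dict.contains_eq_decide_mem_keys]
        have hkeys : ((C.foldl (fun (st : PySem.Dict String Int) c =>
            st.insert (pvBest1 (pvM cd c)).1 (pvBest1 (pvM cd c)).2) PySem.Dict.empty)).keys
            = C.map (fun c => (pvBest1 (pvM cd c)).1) := by
          show ((List.foldl (fun (st : PySem.Dict String Int) c =>
              st.insert (pvBest1 (pvM cd c)).1 (pvBest1 (pvM cd c)).2) PySem.Dict.empty C).items.map (·.1)) = _
          rw [hD1, List.map_map]; rfl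
        rw [hkeys]
        simp only [decide_eq_false_iff_not]
        intro hmem
        obtain ⟨c', hc', hcc⟩ := List.mem_map.mp hmem
        have hc'S : c' ∈ PySem.Set.ofList (pvCk cd) := List.mem_of_mem_filter hc'
        have heq : pvHead p.1 = c' := by
          have h1 : pvHead (String.ofList [pvHead p.1]) = pvHead p.1 := by
            simp [pvHead, String.toList_ofList]
          rw [← h1, ← hcc, pvHead_best cd c' hc'S]
        rw [heq] at hpc
        exact hpc hc')
      (by
        apply List.Nodup.map_on
        · intro x hx y hy hxy
          have hxL : x ∈ pvL cd := List.mem_of_mem_filter hx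
          have hyL : y ∈ pvL cd := List.mem_of_mem_filter hy
          have hxc := (List.mem_filter.mp hx).2
          simp only [decide_eq_true_eq] at hxc
          have hheads : pvHead x.1 = pvHead y.1 := by
            have := congrArg String.toList hxy
            simpa [String.toList_ofList, pvHead] using this
          -- both x and y lie in the same group, which has at most one element
          have hxM : x ∈ pvM cd (pvHead x.1) := pvM_self cd x hxL
          have hyM : y ∈ pvM cd (pvHead x.1) := by rw [hheads]; exact pvM_self cd y hyL
          have hlen : (pvM cd (pvHead x.1)).length ≤ 1 := by
            by_contra hgt
            push_neg at hgt
            exact hxc (List.mem_filter.mpr ⟨(PySem.Set.mem_ofList _ _).mpr (pvCk_mem cd x hxL),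
              by simpa using hgt⟩)
          cases hM : pvM cd (pvHead x.1) with
          | nil => rw [hM] at hxM; simp at hxM
          | cons a rest =>
            rw [hM] at hxM hyM hlen
            cases rest with
            | nil =>
              simp only [List.mem_singleton] at hxM hyM
              rw [hxM, hyM]
            | cons b bs => simp at hlen
        · exact List.Nodup.filter _ (pvL_nodup cd))]
  rw [hD1]

theorem pvTails_eq (cd : List (String × Int)) :
    ((pvL cd).filter (fun p => decide (pvHead p.1 ∉
        (PySem.Set.ofList (pvCk cd)).filter (fun c => decide (1 < (pvM cd c).length))))).map
      (fun p => (String.ofList [pvHead p.1], p.2))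
    = ((PySem.Set.ofList (pvCk cd)).filter (fun c => decide ((pvM cd c).length = 1))).map
      (fun c => (String.ofList [c], (pvBest1 (pvM cd c)).2)) := by
  have h1 : (PySem.Set.ofList (pvCk cd)).filter (fun c => decide ((pvM cd c).length = 1))
      = (pvCk cd).filter (fun c => decide ((pvM cd c).length = 1)) := by
    apply pvOfList_filter
    intro b hb
    simp only [decide_eq_true_eq] at hb
    rw [pvCount_head, hb]
  have h2 : (pvCk cd).filter (fun c => decide ((pvM cd c).length = 1))
      = ((pvL cd).filter (fun p => decide ((pvM cd (pvHead p.1)).length = 1))).map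
          (fun p => pvHead p.1) := by
    rw [pvCk, List.filter_map]; rfl
  rw [h1, h2, List.map_map]
  have h3 : (pvL cd).filter (fun p => decide (pvHead p.1 ∉
        (PySem.Set.ofList (pvCk cd)).filter (fun c => decide (1 < (pvM cd c).length))))
      = (pvL cd).filter (fun p => decide ((pvM cd (pvHead p.1)).length = 1)) := by
    apply List.filter_congr
    intro p hp
    have hpS : pvHead p.1 ∈ PySem.Set.ofList (pvCk cd) :=
      (PySem.Set.mem_ofList _ _).mpr (pvCk_mem cd p hp)
    have hpos : 0 < (pvM cd (pvHead p.1)).length :=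
      List.length_pos_of_mem (pvM_self cd p hp)
    simp only [decide_eq_decide, List.mem_filter, decide_eq_true_eq]
    constructor
    · intro hnot
      by_contra hne
      have : 1 < (pvM cd (pvHead p.1)).length := by omega
      exact hnot ⟨hpS, this⟩
    · intro h1' hmem
      omega
  rw [h3]
  apply List.map_congr_left
  intro p hp
  have hpL : p ∈ pvL cd := List.mem_of_mem_filter hp
  have hp1 := (List.mem_filter.mp hp).2
  simp only [decide_eq_true_eq] at hp1
  have hpM : p ∈ pvM cd (pvHead p.1) := pvM_self cd p hpL
  obtain ⟨a, ha⟩ := List.length_eq_one_iff.mp hp1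
  rw [ha] at hpM
  simp only [List.mem_singleton] at hpM
  simp only [Function.comp_def, ha, ← hpM, pvBest1, pvBest, List.foldl_nil]

theorem main_eq (cd : List (String × Int))
    (hpre2 : ∀ p ∈ (PySem.Dict.ofList cd).items,
       1 < ((PySem.Dict.ofList cd).items.filter
              (fun q => q.1.toList.headD ' ' == p.1.toList.headD ' ')).length →
       ∃ q ∈ (PySem.Dict.ofList cd).items,
         q.1.toList.headD ' ' = p.1.toList.headD ' ' ∧ 0 ≤ q.2) :
    generate_result_dict cd = generate_result_dict_alt cd := by
  have hex : ∀ c ∈ PySem.Set.ofList (pvCk cd), 1 < (pvM cd c).length →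
      ∃ q ∈ pvM cd c, 0 ≤ q.2 := by
    intro c hc hlen
    obtain ⟨p, hp, hpc⟩ := List.mem_map.mp ((PySem.Set.mem_ofList _ _).mp hc)
    have hfilter : (PySem.Dict.ofList cd).items.filter
        (fun q => q.1.toList.headD ' ' == p.1.toList.headD ' ') = pvM cd c := by
      simp only [pvM, pvHead, pvL]
      have : p.1.toList.headD ' ' = c := hpc
      rw [this]
    obtain ⟨q, hq, hqc, hq0⟩ := hpre2 p hp (by rw [hfilter]; exact hlen)
    refine ⟨q, List.mem_filter.mpr ⟨hq, ?_⟩, hq0⟩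
    have hqc2 : q.1.toList.headD ' ' = c := by
      rw [hqc]; exact hpc
    simp only [pvHead]
    rw [hqc2]
    simp
  rw [portA_eq cd hex, portB_eq cd, pvTails_eq cd]

-- ===== VERDICT (by name: the statement is the Claim_ definition above) =====
theorem generate_result_dict_spec : Claim_equal_generate_result_dict := by
  intro cd _ hpre
  unfold Spec_generate_result_dict
  exact main_eq cd hpre.2
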